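-- pv_equiv track=rewrite | github.com/Cliff08/Berkeley-cs61a-2022-summer | hw/hw04/hw04/hw04.py | remove_odd_indices
-- ===== SOURCE A (Python) =====
-- def remove_odd_indices(lst, odd):
--     """Remove elements of lst that have odd indices. Use recursion!
--
--     >>> s = [1, 2, 3, 4]
--     >>> t = remove_odd_indices(s, True)
--     >>> s
--     [1, 2, 3, 4]
--     >>> t
--     [1, 3]
--     >>> l = [5, 6, 7, 8]
--     >>> m = remove_odd_indices(l, False)
--     >>> m
--     [6, 8]
--     >>> remove_odd_indices([9, 8, 7, 6, 5, 4, 3], False)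
--     [8, 6, 4]
--     >>> remove_odd_indices([2], False)
--     []
--     >>> # Do not use while/for loops!
--     >>> from construct_check import check
--     >>> # ban iteration
--     >>> check(HW_SOURCE_FILE, 'remove_odd_indices',
--     ...       ['While', 'For'])
--     True
--     """
--     "*** YOUR CODE HERE ***"
--     if len(lst)==0:
--         return []
--     if odd:
--         return [lst[0]]+remove_odd_indices(lst[2:], odd)
--     else:
--         if len(lst)==1:
--             return []
--         return [lst[1]]+remove_odd_indices(lst[2:], odd)
-- ===== SOURCE B (Python) =====
-- def remove_odd_indices(lst, odd):
--     start = 0 if odd else 1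
--     result = []
--     for i in range(start, len(lst), 2):
--         result.append(lst[i])
--     return result
-- ===== Notes on version B (the rewrite author's own statement) =====
-- stated objective: faster
-- what changed: Replaces the recursion with repeated list slicing/concatenation by a single explicit loop over range(start, len(lst), 2) that appends the kept elements to an accumulator.
import Mathlib
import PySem

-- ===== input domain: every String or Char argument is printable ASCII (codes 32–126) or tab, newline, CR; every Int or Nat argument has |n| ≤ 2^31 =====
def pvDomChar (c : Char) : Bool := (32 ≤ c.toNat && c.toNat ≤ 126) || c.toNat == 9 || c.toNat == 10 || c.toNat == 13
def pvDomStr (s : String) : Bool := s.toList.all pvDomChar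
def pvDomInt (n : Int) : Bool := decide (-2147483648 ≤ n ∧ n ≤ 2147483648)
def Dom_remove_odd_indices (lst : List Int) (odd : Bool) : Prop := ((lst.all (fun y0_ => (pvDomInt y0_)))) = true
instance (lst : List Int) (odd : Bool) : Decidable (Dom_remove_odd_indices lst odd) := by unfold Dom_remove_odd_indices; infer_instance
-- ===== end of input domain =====

-- B replaces the recursion over lst[2:] by one explicit pass over range(start, len(lst), 2) appending kept elements; measurably faster (A's repeated slicing/concatenation is quadratic).
-- ===== PORT A =====
def remove_odd_indices (lst : List Int) (odd : Bool) : List Int :=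
  if lst.length = 0 then []
  else if odd then
    [PySem.List.pyGetD lst 0 0] ++ remove_odd_indices (PySem.List.slice lst (some 2) none) odd
  else if lst.length = 1 then []
  else
    [PySem.List.pyGetD lst 1 0] ++ remove_odd_indices (PySem.List.slice lst (some 2) none) odd
termination_by lst.length
decreasing_by
  all_goals
    rw [PySem.List.slice_from _ (by norm_num)]
    simp only [List.length_drop]
    omega

-- ===== PORT B =====
def remove_odd_indices_alt (lst : List Int) (odd : Bool) : List Int :=
  let start : Int := if odd then 0 else 1
  (PySem.List.pyRange start (lst.length : Int) 2).foldl
    (fun result i => result ++ [PySem.List.pyGetD lst i 0]) []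

-- ===== PRECONDITION & SPEC =====
def Spec_remove_odd_indices (lst : List Int) (odd : Bool) (out : List Int) : Prop := out = remove_odd_indices_alt lst odd
instance (lst : List Int) (odd : Bool) (out : List Int) : Decidable (Spec_remove_odd_indices lst odd out) := by unfold Spec_remove_odd_indices; infer_instance

-- ===== CLAIM (what is proved, stated in full; the proofs are below) =====
def Claim_equal_remove_odd_indices : Prop := ∀ (lst : List Int) (odd : Bool), Dom_remove_odd_indices lst odd → Spec_remove_odd_indices lst odd (remove_odd_indices lst odd)

-- ===== LEMMAS AND PROOFS =====
lemma pr2_cons (a b : Int) (h : a < b) :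
    PySem.List.pyRange a b 2 = a :: PySem.List.pyRange (a+2) b 2 := by
  rw [PySem.List.pyRange_of_pos _ _ (by norm_num : (0:Int) < 2),
      PySem.List.pyRange_of_pos _ _ (by norm_num : (0:Int) < 2)]
  rw [if_pos h]
  have hc : ((b - a + 2 - 1) / 2).toNat
      = (if a + 2 < b then ((b - (a+2) + 2 - 1) / 2).toNat else 0) + 1 := by
    split_ifs with h2 <;> omega
  rw [hc, List.range_succ_eq_map, List.map_cons, List.map_map]
  congr 1
  · norm_num
  · congr 1
    funext k
    simp [Function.comp]
    ring

lemma pr2_shift (a b : Int) :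
    PySem.List.pyRange (a+2) b 2 = (PySem.List.pyRange a (b-2) 2).map (· + 2) := by
  rw [PySem.List.pyRange_of_pos _ _ (by norm_num : (0:Int) < 2),
      PySem.List.pyRange_of_pos _ _ (by norm_num : (0:Int) < 2), List.map_map]
  have hc : (if a + 2 < b then ((b - (a+2) + 2 - 1) / 2).toNat else 0)
      = (if a < b - 2 then ((b - 2 - a + 2 - 1) / 2).toNat else 0) := by
    split_ifs with h1 h2 <;> omega
  rw [hc]
  congr 1
  funext k
  simp [Function.comp]
  ring

lemma alt_eq_map (lst : List Int) (odd : Bool) :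
    remove_odd_indices_alt lst odd
      = (PySem.List.pyRange (if odd then 0 else 1) (lst.length : Int) 2).map
          (fun i => PySem.List.pyGetD lst i 0) := by
  simp only [remove_odd_indices_alt]
  rw [PySem.List.foldl_append_singleton_eq_map]
  simp

lemma a_eq_map : ∀ (n : Nat) (lst : List Int), lst.length = n → ∀ odd : Bool,
    remove_odd_indices lst odd
      = (PySem.List.pyRange (if odd then 0 else 1) (lst.length : Int) 2).map
          (fun i => PySem.List.pyGetD lst i 0) := by
  intro n
  induction n using Nat.strong_induction_on with
  | _ n ih =>
    intro lst hlen odd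
    match lst with
    | [] => cases odd <;> simp [remove_odd_indices, PySem.List.pyRange]
    | [a] =>
      cases odd
      · rw [remove_odd_indices]
        norm_num [show PySem.List.pyRange 1 (1:Int) 2 = [] from rfl]
      · rw [remove_odd_indices]
        rw [PySem.List.slice_from _ (by norm_num : (0:Int) ≤ 2)]
        norm_num [show remove_odd_indices [] true = [] from by rw [remove_odd_indices]; simp,
          show PySem.List.pyRange 0 (1:Int) 2 = [0] from rfl,
          show ((2:Int)).toNat = 2 from rfl,
          PySem.List.pyGetD_of_nonneg _ _ (by norm_num : (0:Int) ≤ 0)]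
    | a :: b :: rest =>
      have hrl : rest.length < n := by simp at hlen; omega
      have hcast : ((a :: b :: rest).length : Int) - 2 = (rest.length : Int) := by
        simp only [List.length_cons]; push_cast; ring
      have hbig : (1 : Int) < ((a :: b :: rest).length : Int) := by
        simp only [List.length_cons]; push_cast; omega
      have hbig0 : (0 : Int) < ((a :: b :: rest).length : Int) := by omega
      have ihr := ih rest.length hrl rest rfl
      cases odd
      · -- odd = false : start 1
        simp only [Bool.false_eq_true, if_false]
        rw [pr2_cons 1 _ hbig, pr2_shift, hcast]
        rw [remove_odd_indices]
        simp only [List.length_cons, if_neg (by omega : ¬ rest.length + 1 + 1 = 0),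
          Bool.false_eq_true,
          if_neg (by omega : ¬ rest.length + 1 + 1 = 1)]
        rw [PySem.List.slice_from _ (by norm_num : (0:Int) ≤ 2)]
        simp only [show ((2:Int)).toNat = 2 from rfl, List.drop_succ_cons, List.drop_zero]
        rw [ihr false]
        simp only [reduceIte, List.singleton_append]
        congr 1
        rw [List.map_map]
        apply List.map_congr_left
        intro i hi
        have h0 : 0 ≤ i := by
          have := ((PySem.List.mem_pyRange_iff_of_pos (by norm_num) i).mp hi).1
          omega
        simp only [Function.comp_apply]
        rw [PySem.List.pyGetD_of_nonneg (a :: b :: rest) 0 (by omega : (0:Int) ≤ i + 2),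
          PySem.List.pyGetD_of_nonneg rest 0 h0]
        have ht : (i + 2).toNat = i.toNat + 2 := by omega
        simp [ht]
      · -- odd = true : start 0
        simp only [reduceIte]
        rw [pr2_cons 0 _ hbig0, pr2_shift, hcast]
        rw [remove_odd_indices]
        simp only [List.length_cons, if_neg (by omega : ¬ rest.length + 1 + 1 = 0), reduceIte]
        rw [PySem.List.slice_from _ (by norm_num : (0:Int) ≤ 2)]
        simp only [show ((2:Int)).toNat = 2 from rfl, List.drop_succ_cons, List.drop_zero]
        rw [ihr true]
        simp only [reduceIte, List.singleton_append]
        congr 1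
        rw [List.map_map]
        apply List.map_congr_left
        intro i hi
        have h0 : 0 ≤ i := by
          have := ((PySem.List.mem_pyRange_iff_of_pos (by norm_num) i).mp hi).1
          omega
        simp only [Function.comp_apply]
        rw [PySem.List.pyGetD_of_nonneg (a :: b :: rest) 0 (by omega : (0:Int) ≤ i + 2),
          PySem.List.pyGetD_of_nonneg rest 0 h0]
        have ht : (i + 2).toNat = i.toNat + 2 := by omega
        simp [ht]

-- ===== VERDICT (by name: the statement is the Claim_ definition above) =====
theorem remove_odd_indices_spec : Claim_equal_remove_odd_indices := by
  intro lst odd _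
  unfold Spec_remove_odd_indices
  rw [a_eq_map lst.length lst rfl odd, alt_eq_map]
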